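-- pv_equiv track=rewrite | github.com/enkot/shevchenko-py | shevchenko/language/letter_case.py | copy_letter_case
-- ===== SOURCE A (Python) =====
-- def copy_letter_case(template_word: str, target_word: str) -> str:
--     """
--     Copies a letter case pattern from a template word to a target word.
--     Returns a modified target word in the letter case of the template word.
--     """
--     result_word = []
--
--     template_len = len(template_word)
--
--     for index, target_letter in enumerate(target_word):
--         if index < template_len:
--             template_letter = template_word[index]
--         elif template_len > 0:
--             template_letter = template_word[-1]
--         else:
--             # Should not happen for normal words, but if template is empty, just keep target as is?
--             # JS code: templateWord[templateWord.length - 1] would be undefined if empty.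
--             # Assuming template is not empty based on logic.
--             result_word.append(target_letter)
--             continue
--
--         if template_letter.islower():
--             result_word.append(target_letter.lower())
--         elif template_letter.isupper():
--             result_word.append(target_letter.upper())
--         else:
--             result_word.append(target_letter)
--
--     return "".join(result_word)
-- ===== SOURCE B (Python) =====
-- def _transfer(t, c):
--     if t.islower():
--         return c.lower()
--     if t.isupper():
--         return c.upper()
--     return c
--
--
-- def copy_letter_case(template_word: str, target_word: str) -> str:
--     """
--     Copies a letter case pattern from a template word to a target word.
--     Returns a modified target word in the letter case of the template word.
--     """
--     # Stage 1: the overlapping prefix, one case transfer per aligned pair.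
--     k = min(len(template_word), len(target_word))
--     head = "".join(_transfer(t, c) for t, c in zip(template_word, target_word))
--     # Stage 2: the overhang past the template is one slice, recased wholesale
--     # by the single rule the template's last character dictates.
--     tail = target_word[k:]
--     if tail and template_word:
--         last = template_word[-1]
--         if last.islower():
--             tail = tail.lower()
--         elif last.isupper():
--             tail = tail.upper()
--     return head + tail
-- ===== Notes on version B (the rewrite author's own statement) =====
-- stated objective: alternative
-- what changed: Replaces A's single per-index loop that branches on the running index (template[i] vs template[-1] vs keep) with two stages: a case transfer over the zipped overlapping prefix, then the overhang taken as one slice and recased wholesale by a single lower()/upper() chosen once from the template's last character.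
import Mathlib
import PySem

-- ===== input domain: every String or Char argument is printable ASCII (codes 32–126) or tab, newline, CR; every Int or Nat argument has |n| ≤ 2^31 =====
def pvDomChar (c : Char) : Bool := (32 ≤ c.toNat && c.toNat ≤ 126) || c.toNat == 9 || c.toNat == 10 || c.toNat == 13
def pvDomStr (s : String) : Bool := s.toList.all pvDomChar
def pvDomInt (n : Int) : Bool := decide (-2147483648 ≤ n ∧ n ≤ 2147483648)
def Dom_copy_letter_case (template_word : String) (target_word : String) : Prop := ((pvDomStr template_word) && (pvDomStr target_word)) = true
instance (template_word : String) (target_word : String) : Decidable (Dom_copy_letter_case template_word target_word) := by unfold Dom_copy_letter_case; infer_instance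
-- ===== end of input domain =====

-- B splits the work in two stages — per-pair case transfer on the zipped prefix, then the
-- overhang as one slice recased wholesale by the template's last character (objective: alternative decomposition).

-- ===== PORT A =====
-- per-character case transfer (A's three-way branch)
def pvApplyCase (t c : Char) : Char :=
  if PySem.Chars.islower t then PySem.Chars.lowerChar c
  else if PySem.Chars.isupper t then PySem.Chars.upperChar c
  else c

def copy_letter_case (template_word : String) (target_word : String) : String :=
  let tmpl := template_word.toList
  let template_len : Int := tmpl.length
  let result_word :=
    (PySem.List.enumerate target_word.toList 0).foldl (fun acc p =>
      let index := p.1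
      let target_letter := p.2
      if index < template_len then
        match PySem.List.pyGet? tmpl index with
        | some template_letter => acc ++ [pvApplyCase template_letter target_letter]
        | none => acc   -- unreachable: index in range
      else if 0 < template_len then
        match PySem.List.pyGet? tmpl (-1) with
        | some template_letter => acc ++ [pvApplyCase template_letter target_letter]
        | none => acc   -- unreachable: template nonempty
      else acc ++ [target_letter]) []
  String.ofList result_word

-- ===== PORT B =====
-- Source B's _transfer is the same three-way branch as A's loop body: reuse pvApplyCase
def copy_letter_case_alt (template_word : String) (target_word : String) : String :=
  let tmpl := template_word.toList
  let tgt := target_word.toList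
  let k := min tmpl.length tgt.length
  let head := (tmpl.zip tgt).map (fun pc => pvApplyCase pc.1 pc.2)
  let tail := tgt.drop k
  let tail' :=
    -- "if tail and template_word:" — both nonempty
    if tail = [] then tail
    else
      match tmpl with
      | [] => tail
      | t :: ts =>
        let last := (t :: ts).getLast (List.cons_ne_nil t ts)
        if PySem.Chars.islower last then tail.map PySem.Chars.lowerChar
        else if PySem.Chars.isupper last then tail.map PySem.Chars.upperChar
        else tail
  String.ofList (head ++ tail')

-- ===== PRECONDITION & SPEC =====
def Spec_copy_letter_case (template_word : String) (target_word : String) (out : String) : Prop := out = copy_letter_case_alt template_word target_word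
instance (template_word : String) (target_word : String) (out : String) : Decidable (Spec_copy_letter_case template_word target_word out) := by unfold Spec_copy_letter_case; infer_instance

-- ===== CLAIM (what is proved, stated in full; the proofs are below) =====
def Claim_equal_copy_letter_case : Prop := ∀ (template_word : String) (target_word : String), Dom_copy_letter_case template_word target_word → Spec_copy_letter_case template_word target_word (copy_letter_case template_word target_word)

-- ===== LEMMAS AND PROOFS =====

theorem pvPyGet_neg_one (xs : List Char) (h : xs ≠ []) :
    PySem.List.pyGet? xs (-1) = some (xs.getLast h) := by
  have hl : xs.length ≠ 0 := by simpa using h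
  simp only [PySem.List.pyGet?, PySem.List.pyIdx?]
  split_ifs with h1 h2 <;> try omega
  have ht : (- -1 : Int).toNat = 1 := rfl
  simp only [ht]
  simp [List.getElem?_eq_getElem (show xs.length - 1 < xs.length by omega),
    List.getLast_eq_getElem]

-- A's fold over enumerate equals "zip-prefix map ++ last-char map over the dropped tail"
theorem copy_letter_case_lists (tmpl tgt : List Char) :
    (PySem.List.enumerate tgt 0).foldl (fun acc p =>
      if p.1 < (tmpl.length : Int) then
        match PySem.List.pyGet? tmpl p.1 with
        | some template_letter => acc ++ [pvApplyCase template_letter p.2]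
        | none => acc
      else if 0 < (tmpl.length : Int) then
        match PySem.List.pyGet? tmpl (-1) with
        | some template_letter => acc ++ [pvApplyCase template_letter p.2]
        | none => acc
      else acc ++ [p.2]) [] =
    (match tmpl with
     | [] => tgt
     | t :: ts =>
       ((( t :: ts).zip tgt).map (fun pc => pvApplyCase pc.1 pc.2)) ++
         (tgt.drop (t :: ts).length).map
           (pvApplyCase ((t :: ts).getLast (List.cons_ne_nil t ts)))) := by
  cases tmpl with
  | nil =>
    have hbody := PySem.List.foldl_congr_mem
      (l := PySem.List.enumerate tgt 0) (init := ([] : List Char))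
      (f := fun acc p =>
        if p.1 < (([] : List Char).length : Int) then
          match PySem.List.pyGet? ([] : List Char) p.1 with
          | some template_letter => acc ++ [pvApplyCase template_letter p.2]
          | none => acc
        else if 0 < (([] : List Char).length : Int) then
          match PySem.List.pyGet? ([] : List Char) (-1) with
          | some template_letter => acc ++ [pvApplyCase template_letter p.2]
          | none => acc
        else acc ++ [p.2])
      (g := fun acc (p : Int × Char) => acc ++ [p.2])
      (by
        intro acc p hp
        obtain ⟨k, hk, rfl⟩ := (PySem.List.mem_enumerate_iff _ _ _).1 hp
        simp)
    rw [hbody, PySem.List.foldl_append_singleton_eq_map]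
    simp [PySem.List.map_snd_enumerate]
  | cons t ts =>
    have hne : (t :: ts) ≠ [] := List.cons_ne_nil t ts
    have hbody := PySem.List.foldl_congr_mem
      (l := PySem.List.enumerate tgt 0) (init := ([] : List Char))
      (f := fun acc p =>
        if p.1 < ((t :: ts).length : Int) then
          match PySem.List.pyGet? (t :: ts) p.1 with
          | some template_letter => acc ++ [pvApplyCase template_letter p.2]
          | none => acc
        else if 0 < ((t :: ts).length : Int) then
          match PySem.List.pyGet? (t :: ts) (-1) with
          | some template_letter => acc ++ [pvApplyCase template_letter p.2]
          | none => acc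
        else acc ++ [p.2])
      (g := fun acc (p : Int × Char) => acc ++ [pvApplyCase
        (if p.1 < ((t :: ts).length : Int)
         then (PySem.List.pyGet? (t :: ts) p.1).getD t
         else (t :: ts).getLast hne) p.2])
      (by
        intro acc p hp
        obtain ⟨k, hk, rfl⟩ := (PySem.List.mem_enumerate_iff _ _ _).1 hp
        by_cases hkl : k < (t :: ts).length
        · have hks : k ≤ ts.length := Nat.lt_succ_iff.mp hkl
          simp [hks]
        · have hks : ¬ k ≤ ts.length := by
            simp only [List.length_cons] at hkl; omega
          simp [hks, pvPyGet_neg_one (t :: ts) hne])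
    rw [hbody, PySem.List.foldl_append_singleton_eq_map]
    simp only [List.nil_append]
    apply List.ext_getElem
    · simp [PySem.List.length_enumerate, List.length_zip]
      omega
    · intro i h1 h2
      have hi : i < tgt.length := by
        simpa [PySem.List.length_enumerate] using h1
      rw [List.getElem_map, PySem.List.getElem_enumerate]
      simp only [zero_add]
      by_cases hil : i < (t :: ts).length
      · have hc : ((i : Int)) < ((t :: ts).length : Int) := by exact_mod_cast hil
        have hg : PySem.List.pyGet? (t :: ts) (i : Int) = some (t :: ts)[i] := by
          simp [List.getElem?_eq_getElem hil]
        have hzl : i < (((t :: ts).zip tgt).map (fun pc => pvApplyCase pc.1 pc.2)).length := by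
          simp only [List.length_map, List.length_zip, List.length_cons] at *
          omega
        rw [if_pos hc, hg, List.getElem_append_left hzl]
        simp [List.getElem_zip]
      · have hil2 : (t :: ts).length ≤ i := Nat.le_of_not_lt hil
        have hc : ¬ ((i : Int)) < ((t :: ts).length : Int) := by exact_mod_cast hil
        have hlen : (((t :: ts).zip tgt).map (fun pc => pvApplyCase pc.1 pc.2)).length
            = (t :: ts).length := by
          simp only [List.length_map, List.length_zip, List.length_cons] at *
          omega
        rw [if_neg hc, List.getElem_append_right (hlen ▸ hil2)]
        rw [List.getElem_map, List.getElem_drop]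
        have hidx : (t :: ts).length +
            (i - (((t :: ts).zip tgt).map (fun pc => pvApplyCase pc.1 pc.2)).length) = i := by
          simp only [List.length_map, hlen] at *
          omega
        simp only [hidx]

-- B's staged tail equals mapping the last-char transfer over the dropped tail
theorem pvTail_eq (t : Char) (ts tgt : List Char) :
    (if tgt.drop (min (t :: ts).length tgt.length) = []
       then tgt.drop (min (t :: ts).length tgt.length)
     else
       if PySem.Chars.islower ((t :: ts).getLast (List.cons_ne_nil t ts)) then
         (tgt.drop (min (t :: ts).length tgt.length)).map PySem.Chars.lowerChar
       else if PySem.Chars.isupper ((t :: ts).getLast (List.cons_ne_nil t ts)) then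
         (tgt.drop (min (t :: ts).length tgt.length)).map PySem.Chars.upperChar
       else tgt.drop (min (t :: ts).length tgt.length)) =
    (tgt.drop (t :: ts).length).map
      (pvApplyCase ((t :: ts).getLast (List.cons_ne_nil t ts))) := by
  have hdrop : tgt.drop (min (t :: ts).length tgt.length) = tgt.drop (t :: ts).length := by
    rcases Nat.le_total (t :: ts).length tgt.length with h | h
    · rw [Nat.min_eq_left h]
    · rw [Nat.min_eq_right h, List.drop_eq_nil_of_le h, List.drop_eq_nil_of_le (le_refl _)]
  rw [hdrop]
  by_cases hnil : tgt.drop (t :: ts).length = []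
  · rw [if_pos hnil, hnil]
    rfl
  · rw [if_neg hnil]
    split_ifs with h1 h2
    · exact List.map_congr_left (fun c _ => by simp [pvApplyCase, h1])
    · exact List.map_congr_left (fun c _ => by simp [pvApplyCase, h1, h2])
    · symm
      rw [List.map_congr_left (g := id) (fun c _ => by simp [pvApplyCase, h1, h2])]
      simp

-- ===== VERDICT (by name: the statement is the Claim_ definition above) =====
theorem copy_letter_case_spec : Claim_equal_copy_letter_case := by
  intro template_word target_word _
  unfold Spec_copy_letter_case copy_letter_case copy_letter_case_alt
  simp only []
  rw [copy_letter_case_lists template_word.toList target_word.toList]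
  cases hL : template_word.toList with
  | nil => simp
  | cons t ts =>
    simp only []
    rw [pvTail_eq t ts target_word.toList]
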